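-- pv_equiv track=rewrite | github.com/ECAP5/ECAP5-TREQ | src/ecap5_treq/req.py | rst_process_desc
-- ===== SOURCE A (Python) =====
-- def rst_process_desc(cur: int, lines: list[str]) -> tuple[int, str]:
--     """Processes the description
--
--     :param cur: pointer to the content's current line being processed
--     :type cur: int
--
--     :param lines: list of lines to process
--     :type lines: list[str]
--
--     :returns: a tuple with both the incremented cur and the processed description
--     :rtype: tuple[int, str]
--     """
--     desc = []
--     # While the line is either empty of there are tabs
--     while cur < len(lines) and (len(lines[cur]) == 0 or (lines[cur][0] == " ")):
--         desc += [lines[cur]]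
--         cur += 1
--
--     # Remove the empty trailing lines
--     i = len(desc)-1
--     while i > 0 and desc[i].strip() == "":
--         i -= 1
--     desc = [x.strip() for x in desc[0:i+1]]
--
--     desc = "\n".join(desc)
--     return (cur, desc)
-- ===== SOURCE B (Python) =====
-- def rst_process_desc(cur: int, lines: list[str]) -> tuple[int, str]:
--     # Single streaming pass: build the description string directly while scanning,
--     # deferring newlines for blank lines so trailing blanks never get emitted.
--     out = ""
--     seen = False
--     pending = 0
--     while cur < len(lines) and (len(lines[cur]) == 0 or lines[cur][0] == " "):
--         t = lines[cur].strip()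
--         if t == "":
--             pending += 1
--         elif not seen:
--             out = "\n" * pending + t
--             seen = True
--             pending = 0
--         else:
--             out += "\n" * (pending + 1) + t
--             pending = 0
--         cur += 1
--     return (cur, out)
-- ===== Notes on version B (the rewrite author's own statement) =====
-- stated objective: alternative
-- what changed: B builds the description string directly in one streaming pass with a deferred-newline counter for blank lines (so trailing blanks are never emitted), replacing A's collect-into-a-list, backward trim-index scan, slice, strip comprehension and join.
import Mathlib
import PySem

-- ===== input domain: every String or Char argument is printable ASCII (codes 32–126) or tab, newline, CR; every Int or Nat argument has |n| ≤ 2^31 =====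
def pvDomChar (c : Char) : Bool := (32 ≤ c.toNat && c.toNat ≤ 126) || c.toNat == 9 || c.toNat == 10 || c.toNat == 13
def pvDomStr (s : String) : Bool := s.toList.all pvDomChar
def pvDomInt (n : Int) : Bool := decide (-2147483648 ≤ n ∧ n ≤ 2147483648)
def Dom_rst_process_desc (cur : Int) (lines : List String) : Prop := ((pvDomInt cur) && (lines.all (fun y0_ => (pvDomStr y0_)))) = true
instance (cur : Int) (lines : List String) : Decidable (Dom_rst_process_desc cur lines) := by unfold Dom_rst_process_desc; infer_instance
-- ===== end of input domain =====

-- B builds the description in ONE streaming pass with a deferred-newline counter, with no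
-- intermediate list and no trailing-trim phase (objective: simpler decomposition).

-- ===== PORT A =====
-- the while loop: collects the raw lines; iteration count bounded by the structural fuel
-- ((lines.length - cur).toNat, enough for every iteration the Python loop performs, and at
-- fuel 0 the loop condition is false so the exhaustion value IS the loop-exit value);
-- 'lines[cur]' is in range under Pre_ (here pyGetD with an unreachable default);
-- 'lines[cur][0] == " "' is the head-char test.
def rstLoopA (lines : List String) : Nat → Int → Int × List String
  | 0, cur => (cur, [])
  | fuel + 1, cur =>
    if cur < (lines.length : Int) ∧
        (let s := PySem.List.pyGetD lines cur ""
         s.toList.length = 0 ∨ s.toList[0]? = some ' ') then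
      let r := rstLoopA lines fuel (cur + 1)
      (r.1, PySem.List.pyGetD lines cur "" :: r.2)
    else (cur, [])

-- the backward index scan 'i = len(desc)-1; while i > 0 and desc[i].strip() == "": i -= 1',
-- on the Nat i (for desc = [] Python's i = -1 and my i = 0 give the same sliced result []).
def rstTrimIdxA (desc : List String) : Nat → Nat
  | 0 => 0
  | i + 1 => if PySem.Str.strip (desc.getD (i + 1) "") = "" then rstTrimIdxA desc i else i + 1

def rst_process_desc (cur : Int) (lines : List String) : Int × String :=
  let r := rstLoopA lines ((lines.length : Int) - cur).toNat cur
  let i := rstTrimIdxA r.2 (r.2.length - 1)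
  let desc := (r.2.take (i + 1)).map PySem.Str.strip
  (r.1, PySem.Str.join "\n" desc)

-- ===== PORT B =====
-- '"\n" * pending'
def rstNl (p : Nat) : List Char := List.replicate p '\n'

-- Source B's single while loop, state (out, seen, pending), same fuel scheme as rstLoopA;
-- 'out' is carried as its character list (exact: Python string concatenation = List.append
-- on the characters, converted back with String.ofList on return); 't == ""' is 't.toList = []'.
def rstLoopB (lines : List String) : Nat → Int → List Char → Bool → Nat → Int × String
  | 0, cur, out, _, _ => (cur, String.ofList out)
  | fuel + 1, cur, out, seen, pending =>
    if cur < (lines.length : Int) ∧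
        (let s := PySem.List.pyGetD lines cur ""
         s.toList.length = 0 ∨ s.toList[0]? = some ' ') then
      let t := (PySem.Str.strip (PySem.List.pyGetD lines cur "")).toList
      if t = [] then rstLoopB lines fuel (cur + 1) out seen (pending + 1)
      else if seen = false then rstLoopB lines fuel (cur + 1) (rstNl pending ++ t) true 0
      else rstLoopB lines fuel (cur + 1) (out ++ rstNl (pending + 1) ++ t) true 0
    else (cur, String.ofList out)

def rst_process_desc_alt (cur : Int) (lines : List String) : Int × String :=
  rstLoopB lines ((lines.length : Int) - cur).toNat cur [] false 0

-- ===== PRECONDITION & SPEC =====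
-- Pre_ excludes exactly the inputs where A raises IndexError: cur below -len(lines)
-- (Python's negative indexing wraps once; below -len, lines[cur] raises).
def Pre_rst_process_desc (cur : Int) (lines : List String) : Prop :=
  -(lines.length : Int) ≤ cur
instance (cur : Int) (lines : List String) : Decidable (Pre_rst_process_desc cur lines) := by
  unfold Pre_rst_process_desc; infer_instance

def pvWitness_rst_process_desc : Int × List String := (0, ["  a ", "", "  b", " ", "x"])

def Spec_rst_process_desc (cur : Int) (lines : List String) (out : Int × String) : Prop := out = rst_process_desc_alt cur lines
instance (cur : Int) (lines : List String) (out : Int × String) : Decidable (Spec_rst_process_desc cur lines out) := by unfold Spec_rst_process_desc; infer_instance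

-- ===== CLAIM (what is proved, stated in full; the proofs are below) =====
def Claim_equal_rst_process_desc : Prop := ∀ (cur : Int) (lines : List String), Dom_rst_process_desc cur lines → Pre_rst_process_desc cur lines → Spec_rst_process_desc cur lines (rst_process_desc cur lines)

-- ===== LEMMAS AND PROOFS =====

-- the stripped collected lines, as char lists
def rstStripped (desc : List String) : List (List Char) :=
  desc.map (fun s => (PySem.Str.strip s).toList)

-- proof-side model of B's per-line processing, over the already-collected stripped lines
def rstStream : List (List Char) → List Char → Bool → Nat → List Char
  | [], out, _, _ => out
  | t :: ts, out, seen, p =>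
    if t = [] then rstStream ts out seen (p + 1)
    else if seen = false then rstStream ts (rstNl p ++ t) true 0
    else rstStream ts (out ++ rstNl (p + 1) ++ t) true 0

-- B's loop = A's collection loop followed by the stream over the stripped collected lines
theorem rstLoopB_eq (lines : List String) (fuel : Nat) (cur : Int) (out : List Char)
    (seen : Bool) (p : Nat) :
    rstLoopB lines fuel cur out seen p =
      ((rstLoopA lines fuel cur).1,
        String.ofList (rstStream (rstStripped (rstLoopA lines fuel cur).2) out seen p)) := by
  induction fuel generalizing cur out seen p with
  | zero => simp [rstLoopA, rstLoopB, rstStripped, rstStream]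
  | succ fuel ih =>
    rw [rstLoopB, rstLoopA]
    split
    · simp only [rstStripped, List.map_cons, rstStream]
      split
      · rw [ih]; rfl
      · split
        · rw [ih]; rfl
        · rw [ih]; rfl
    · simp [rstStream, rstStripped]

-- proof-side trailing-blank trimming, structural on the front
def rstTrimT : List (List Char) → List (List Char)
  | [] => []
  | u :: us => let r := rstTrimT us; if u = [] ∧ r = [] then [] else u :: r

theorem rstNl_succ (p : Nat) : rstNl p ++ ['\n'] = rstNl (p + 1) := by
  simp [rstNl, List.replicate_succ']

theorem join_cons_ne (u : List Char) (l : List (List Char)) (hl : l ≠ []) :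
    PySem.Chars.join ['\n'] (u :: l) = u ++ ['\n'] ++ PySem.Chars.join ['\n'] l := by
  cases l with
  | nil => exact absurd rfl hl
  | cons v vs => exact PySem.Chars.join_cons_cons _ _ _ _

theorem join_singleton' (u : List Char) : PySem.Chars.join ['\n'] [u] = u := by
  simp [PySem.Chars.join, List.intercalate]

-- streaming with seen = true appends the joined trimmed tail after (p+1) newlines
theorem rstStream_true (us : List (List Char)) (out : List Char) (p : Nat) :
    rstStream us out true p =
      if rstTrimT us = [] then out
      else out ++ rstNl (p + 1) ++ PySem.Chars.join ['\n'] (rstTrimT us) := by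
  induction us generalizing out p with
  | nil => simp [rstStream, rstTrimT]
  | cons u us ih =>
    by_cases hu : u = []
    · subst hu
      rw [show rstStream ([] :: us) out true p = rstStream us out true (p + 1) from by
        simp [rstStream]]
      rw [ih]
      by_cases hr : rstTrimT us = []
      · simp [rstTrimT, hr]
      · have ht : rstTrimT ([] :: us) = [] :: rstTrimT us := by simp [rstTrimT, hr]
        rw [ht, if_neg hr, if_neg (by simp), join_cons_ne [] (rstTrimT us) hr,
          ← rstNl_succ (p + 1)]
        simp [List.append_assoc]
    · rw [show rstStream (u :: us) out true p
          = rstStream us (out ++ rstNl (p + 1) ++ u) true 0 from by simp [rstStream, hu]]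
      rw [ih]
      have ht : rstTrimT (u :: us) = u :: rstTrimT us := by simp [rstTrimT, hu]
      rw [ht]
      by_cases hr : rstTrimT us = []
      · rw [if_pos hr, if_neg (by simp), hr, join_singleton']
      · rw [if_neg hr, if_neg (by simp), join_cons_ne u _ hr]
        simp [rstNl, List.append_assoc]

-- streaming from the initial seen = false state ignores 'out' once a line is emitted
theorem rstStream_false (us : List (List Char)) (out : List Char) (p : Nat) :
    rstStream us out false p =
      if rstTrimT us = [] then out
      else rstNl p ++ PySem.Chars.join ['\n'] (rstTrimT us) := by
  induction us generalizing out p with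
  | nil => simp [rstStream, rstTrimT]
  | cons u us ih =>
    by_cases hu : u = []
    · subst hu
      rw [show rstStream ([] :: us) out false p = rstStream us out false (p + 1) from by
        simp [rstStream]]
      rw [ih]
      by_cases hr : rstTrimT us = []
      · simp [rstTrimT, hr]
      · have ht : rstTrimT ([] :: us) = [] :: rstTrimT us := by simp [rstTrimT, hr]
        rw [ht, if_neg hr, if_neg (by simp), join_cons_ne [] (rstTrimT us) hr,
          ← rstNl_succ p]
        simp [List.append_assoc]
    · rw [show rstStream (u :: us) out false p
          = rstStream us (rstNl p ++ u) true 0 from by simp [rstStream, hu]]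
      rw [rstStream_true]
      have ht : rstTrimT (u :: us) = u :: rstTrimT us := by simp [rstTrimT, hu]
      rw [ht]
      by_cases hr : rstTrimT us = []
      · rw [if_pos hr, if_neg (by simp), hr, join_singleton']
      · rw [if_neg hr, if_neg (by simp), join_cons_ne u _ hr]
        simp [rstNl, List.append_assoc]

-- === relating A's trim index / take / strip-map to rstTrimT ===

-- trim index over the stripped char-list view
def rstTrimIdx' (ts : List (List Char)) : Nat → Nat
  | 0 => 0
  | i + 1 => if ts.getD (i + 1) [] = [] then rstTrimIdx' ts i else i + 1

theorem rstTrimIdxA_eq (desc : List String) (j : Nat) :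
    rstTrimIdxA desc j = rstTrimIdx' (rstStripped desc) j := by
  induction j with
  | zero => rfl
  | succ i ih =>
    have hg : (rstStripped desc).getD (i + 1) [] =
        (PySem.Str.strip (desc.getD (i + 1) "")).toList := by
      simp only [rstStripped, List.getD, List.getElem?_map]
      cases heq : desc[i+1]? with
      | none => simp; decide
      | some v => simp
    have hiff : (PySem.Str.strip (desc.getD (i + 1) "") = "")
        ↔ ((PySem.Str.strip (desc.getD (i + 1) "")).toList = []) := by
      constructor
      · intro h; rw [h]; rfl
      · exact String.toList_eq_nil_iff.mp
    simp only [rstTrimIdxA, rstTrimIdx', hg, ih]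
    by_cases hc : PySem.Str.strip (desc.getD (i + 1) "") = ""
    · rw [if_pos hc, if_pos (hiff.mp hc)]
    · rw [if_neg hc, if_neg (fun h => hc (hiff.mpr h))]

theorem rstTrimIdx'_le (ts : List (List Char)) (j : Nat) : rstTrimIdx' ts j ≤ j := by
  induction j with
  | zero => simp [rstTrimIdx']
  | succ i ih =>
    simp only [rstTrimIdx']
    split
    · omega
    · omega

theorem rstTrimIdx'_append (l : List (List Char)) (x : List Char) (j : Nat) (hj : j < l.length) :
    rstTrimIdx' (l ++ [x]) j = rstTrimIdx' l j := by
  induction j with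
  | zero => rfl
  | succ i ih =>
    have hg : (l ++ [x]).getD (i + 1) [] = l.getD (i + 1) [] := by
      simp [List.getD, List.getElem?_append_left hj]
    simp only [rstTrimIdx', hg]
    split
    · exact ih (by omega)
    · rfl

theorem rstTrimT_append_nil (l : List (List Char)) : rstTrimT (l ++ [[]]) = rstTrimT l := by
  induction l with
  | nil => simp [rstTrimT]
  | cons u us ih => simp [rstTrimT, ih]

theorem rstTrimT_append_ne (l : List (List Char)) (x : List Char) (hx : x ≠ []) :
    rstTrimT (l ++ [x]) = l ++ [x] := by
  induction l with
  | nil => simp [rstTrimT, hx]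
  | cons u us ih =>
    simp only [List.cons_append, rstTrimT, ih]
    rw [if_neg (by simp)]

-- core: A's take-to-the-trim-index equals the trimmed list, up to the join
theorem rstTrim_join_eq (ts : List (List Char)) :
    PySem.Chars.join ['\n'] (ts.take (rstTrimIdx' ts (ts.length - 1) + 1)) =
      PySem.Chars.join ['\n'] (rstTrimT ts) := by
  induction ts using List.reverseRecOn with
  | nil => rfl
  | append_singleton l x ih =>
    by_cases hx : x = []
    · subst hx
      rw [rstTrimT_append_nil]
      cases l with
      | nil => rfl
      | cons y ys =>
        have hlen : ((y :: ys) ++ [([] : List Char)]).length - 1 = ys.length + 1 := by simp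
        have hidx : rstTrimIdx' ((y :: ys) ++ [[]]) (((y :: ys) ++ [([] : List Char)]).length - 1)
            = rstTrimIdx' (y :: ys) ((y :: ys).length - 1) := by
          rw [hlen]
          have hstep : rstTrimIdx' ((y :: ys) ++ [[]]) (ys.length + 1)
              = rstTrimIdx' ((y :: ys) ++ [[]]) ys.length := by
            simp [rstTrimIdx']
          rw [hstep, show ys.length = (y :: ys).length - 1 from by simp]
          exact rstTrimIdx'_append (y :: ys) [] ((y :: ys).length - 1) (by simp)
        rw [hidx]
        have hle : rstTrimIdx' (y :: ys) ((y :: ys).length - 1) + 1 ≤ (y :: ys).length := by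
          have := rstTrimIdx'_le (y :: ys) ((y :: ys).length - 1)
          simp at this ⊢
          omega
        rw [List.take_append_of_le_length hle]
        exact ih
    · rw [rstTrimT_append_ne l x hx]
      have htake : (l ++ [x]).take (rstTrimIdx' (l ++ [x]) ((l ++ [x]).length - 1) + 1)
          = l ++ [x] := by
        cases l with
        | nil => simp [rstTrimIdx']
        | cons y ys =>
          have hat : ((y :: ys) ++ [x]).getD (ys.length + 1) [] = x := by
            simp [List.getD]
          have hlen : ((y :: ys) ++ [x]).length - 1 = ys.length + 1 := by simp
          rw [hlen]
          simp only [rstTrimIdx', hat]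
          rw [if_neg hx]
          apply List.take_of_length_le
          simp
      rw [htake]

-- ===== VERDICT (by name: the statement is the Claim_ definition above) =====
theorem rst_process_desc_spec : Claim_equal_rst_process_desc := by
  intro cur lines _ _
  unfold Spec_rst_process_desc rst_process_desc rst_process_desc_alt
  rw [rstLoopB_eq]
  refine Prod.ext rfl ?_
  simp only
  rw [rstStream_false]
  have hmap : ∀ (l : List String) (n : Nat),
      ((l.take n).map PySem.Str.strip).map String.toList = (rstStripped l).take n := by
    intro l n
    rw [List.map_map, rstStripped, ← List.map_take]
    rfl
  have hlen : (rstStripped (rstLoopA lines ((lines.length : Int) - cur).toNat cur).2).length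
      = (rstLoopA lines ((lines.length : Int) - cur).toNat cur).2.length := by
    simp [rstStripped]
  have key := rstTrim_join_eq (rstStripped (rstLoopA lines ((lines.length : Int) - cur).toNat cur).2)
  rw [hlen, ← rstTrimIdxA_eq] at key
  unfold PySem.Str.join
  rw [hmap, show ("\n" : String).toList = ['\n'] from by decide]
  by_cases htr : rstTrimT (rstStripped (rstLoopA lines ((lines.length : Int) - cur).toNat cur).2) = []
  · rw [if_pos htr, key, htr]
    rfl
  · rw [if_neg htr, key]
    simp [rstNl]
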